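-- pv_equiv track=rewrite | github.com/Sam-297/Hashiwokakero | main.py | rec_dist
-- ===== SOURCE A (Python) =====
-- def rec_dist(ens,enc,deg):
--     """
--     return les listes en construction de la distribution
--     """
--     if deg==0:
--         return enc
--     t=[]
--     for i in enc:
--         for j in ens:
--             if j not in i and ens.index(j)>ens.index(i[-1]):
--                 k=i+[j]
--                 t.append(k)
--     return rec_dist(ens,t,deg-1)
-- ===== SOURCE B (Python) =====
-- def rec_dist(ens, enc, deg):
--     """
--     return les listes en construction de la distribution
--     """
--     first = {}
--     for p, v in enumerate(ens):
--         if v not in first: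
--             first[v] = p
--
--     def extend(path, d):
--         if d <= 0:
--             return [path]
--         out = []
--         for j in ens:
--             if j not in path and first[j] > first[path[-1]]:
--                 out.extend(extend(path + [j], d - 1))
--         return out
--
--     res = []
--     for i in enc:
--         res.extend(extend(i, deg))
--     return res
-- ===== Notes on version B (the rewrite author's own statement) =====
-- stated objective: alternative
-- what changed: Replaces A's breadth-first level-by-level recursion (building the whole list of partial combinations deg times) by a depth-first per-prefix recursion that emits each finished combination directly, with the repeated ens.index scans replaced by a first-occurrence position dict built once; on deg < 0, where A raises RecursionError, B naturally returns enc.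
import Mathlib
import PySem

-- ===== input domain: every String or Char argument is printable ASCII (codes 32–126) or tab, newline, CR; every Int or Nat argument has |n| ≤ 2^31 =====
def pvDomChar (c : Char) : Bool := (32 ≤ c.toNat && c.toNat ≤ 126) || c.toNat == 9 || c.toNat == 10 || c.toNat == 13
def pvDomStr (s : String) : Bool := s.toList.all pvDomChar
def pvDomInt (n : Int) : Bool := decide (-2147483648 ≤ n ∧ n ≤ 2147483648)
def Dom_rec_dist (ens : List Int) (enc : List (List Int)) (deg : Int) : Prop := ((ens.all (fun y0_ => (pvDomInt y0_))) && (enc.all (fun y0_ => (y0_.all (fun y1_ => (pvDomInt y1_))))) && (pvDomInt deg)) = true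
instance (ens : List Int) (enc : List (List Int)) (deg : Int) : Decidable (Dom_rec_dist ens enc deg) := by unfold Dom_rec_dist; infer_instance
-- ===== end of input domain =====

-- B replaces A's breadth-first level-by-level recursion by a depth-first per-prefix recursion
-- with a first-occurrence index dict built once (objective: alternative decomposition).

-- ===== PORT A =====
-- the loop test 'j not in i and ens.index(j) > ens.index(i[-1])'; Python raises where a
-- PySem primitive yields none (empty i or i[-1] not in ens, reached only when j ∉ i) — false there, excluded by Pre_
def condA (ens : List Int) (i : List Int) (j : Int) : Bool :=
  if j ∈ i then false
  else
    match PySem.List.index? ens j, (PySem.List.pyGet? i (-1)).bind (fun last => PySem.List.index? ens last) with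
    | some a, some b => decide (b < a)
    | _, _ => false

-- the body building t from enc
def stepA (ens : List Int) (enc : List (List Int)) : List (List Int) :=
  enc.foldl (fun t i => ens.foldl (fun t j => if condA ens i j then t ++ [i ++ [j]] else t) t) []

def recDistA (ens : List Int) : List (List Int) → Nat → List (List Int)
  | enc, 0 => enc
  | enc, n + 1 => recDistA ens (stepA ens enc) n

def rec_dist (ens : List Int) (enc : List (List Int)) (deg : Int) : List (List Int) :=
  recDistA ens enc deg.toNat   -- recursion counted on deg; A raises (RecursionError) for deg < 0, excluded by Pre_

-- ===== PORT B =====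
-- 'for p, v in enumerate(ens): if v not in first: first[v] = p'
def buildFirst (ens : List Int) : PySem.Dict Int Int :=
  (PySem.List.enumerate ens).foldl
    (fun d pv => if d.contains pv.2 then d else d.insert pv.2 pv.1) PySem.Dict.empty

-- 'j not in path and first[j] > first[path[-1]]' (none where Python raises, as in condA)
def condB (ens : List Int) (first : PySem.Dict Int Int) (path : List Int) (j : Int) : Bool :=
  if j ∈ path then false
  else
    match first.get? j, (PySem.List.pyGet? path (-1)).bind (fun last => first.get? last) with
    | some a, some b => decide (b < a)
    | _, _ => false

def extendB (ens : List Int) (first : PySem.Dict Int Int) : List Int → Nat → List (List Int)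
  | path, 0 => [path]
  | path, n + 1 =>
      ens.foldl
        (fun out j => if condB ens first path j then out ++ extendB ens first (path ++ [j]) n else out) []

def rec_dist_alt (ens : List Int) (enc : List (List Int)) (deg : Int) : List (List Int) :=
  let first := buildFirst ens
  enc.foldl (fun res i => res ++ extendB ens first i deg.toNat) []

-- ===== PRECONDITION & SPEC =====
-- Pre_ excludes exactly the inputs where Python A raises: deg < 0 (RecursionError), and for deg > 0
-- any starting list i of enc that lacks some element of ens but is empty (IndexError on i[-1]) or
-- whose last element is not in ens (ValueError from ens.index).
def Pre_rec_dist (ens : List Int) (enc : List (List Int)) (deg : Int) : Prop :=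
  0 ≤ deg ∧ (deg = 0 ∨ ∀ i ∈ enc, (∃ j ∈ ens, j ∉ i) → ∃ last, i.getLast? = some last ∧ last ∈ ens)
instance (ens : List Int) (enc : List (List Int)) (deg : Int) : Decidable (Pre_rec_dist ens enc deg) := by unfold Pre_rec_dist; infer_instance

def pvWitness_rec_dist : List Int × List (List Int) × Int := ([1, 2, 3], [[1], [2]], 2)

def Spec_rec_dist (ens : List Int) (enc : List (List Int)) (deg : Int) (out : List (List Int)) : Prop := out = rec_dist_alt ens enc deg
instance (ens : List Int) (enc : List (List Int)) (deg : Int) (out : List (List Int)) : Decidable (Spec_rec_dist ens enc deg out) := by unfold Spec_rec_dist; infer_instance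

-- ===== CLAIM (what is proved, stated in full; the proofs are below) =====
def Claim_equal_rec_dist : Prop := ∀ (ens : List Int) (enc : List (List Int)) (deg : Int), Dom_rec_dist ens enc deg → Pre_rec_dist ens enc deg → Spec_rec_dist ens enc deg (rec_dist ens enc deg)

-- ===== LEMMAS AND PROOFS =====

-- buildFirst records each value's first-occurrence position
lemma get?_buildFirst_aux (v : Int) :
    ∀ (xs : List Int) (s : Int) (d : PySem.Dict Int Int),
      ((PySem.List.enumerate xs s).foldl
        (fun d pv => if d.contains pv.2 then d else d.insert pv.2 pv.1) d).get? v
      = (d.get? v).or ((PySem.List.index? xs v).map (fun k => s + (k : Int))) := by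
  intro xs
  induction xs with
  | nil => intro s d; simp [PySem.List.enumerate_nil, PySem.List.index?_eq_idxOf?]
  | cons x t ih =>
    intro s d
    rw [PySem.List.enumerate_cons]
    simp only [List.foldl_cons]
    rw [ih]
    by_cases hvx : v = x
    · subst hvx
      rw [PySem.List.index?_cons_self]
      by_cases hc : d.contains v = true
      · have hs : (d.get? v).isSome := by rw [← PySem.Dict.contains_eq_isSome_get?]; exact hc
        rcases Option.isSome_iff_exists.mp hs with ⟨y, hy⟩
        simp [hc, hy]
      · have hn : d.get? v = none := by
          rcases h : d.get? v with _ | y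
          · rfl
          · exact absurd (by rw [PySem.Dict.contains_eq_isSome_get?, h]; rfl) hc
        simp [hc, hn, PySem.Dict.get?_insert_self]
    · have hne : ¬ (x = v) := fun h => hvx h.symm
      rw [PySem.List.index?_cons_of_ne t hne]
      have hget : (if d.contains x = true then d else d.insert x s).get? v = d.get? v := by
        split
        · rfl
        · exact PySem.Dict.get?_insert_of_ne d s hvx
      rw [hget]
      rcases h : PySem.List.index? t v with _ | k
      · simp
      · have : s + ((k : Int) + 1) = s + 1 + (k : Int) := by ring
        simp [this]

lemma get?_buildFirst (ens : List Int) (v : Int) :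
    (buildFirst ens).get? v = (PySem.List.index? ens v).map (fun k => (k : Int)) := by
  unfold buildFirst
  rw [get?_buildFirst_aux]
  rcases h : PySem.List.index? ens v with _ | k <;> simp [PySem.Dict.get?_empty]

-- the two loop tests agree
lemma condB_eq_condA (ens : List Int) (i : List Int) (j : Int) :
    condB ens (buildFirst ens) i j = condA ens i j := by
  unfold condA condB
  by_cases hj : j ∈ i
  · simp [hj]
  · simp only [hj, if_false]
    rw [get?_buildFirst]
    rcases hl : PySem.List.pyGet? i (-1) with _ | last
    · simp
    · simp only [Option.bind_some]
      rw [get?_buildFirst]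
      rcases ha : PySem.List.index? ens j with _ | a <;>
        rcases hb : PySem.List.index? ens last with _ | b <;>
          simp

-- generic loop shapes
lemma foldl_append_if_eq_flatMap_ite {α β : Type} (l : List α) (p : α → Bool) (h : α → List β) :
    l.foldl (fun acc x => if p x then acc ++ h x else acc) ([] : List β)
      = l.flatMap (fun x => if p x then h x else []) := by
  have : (fun (acc : List β) x => if p x then acc ++ h x else acc)
       = (fun acc x => acc ++ (if p x then h x else [])) := by
    funext acc x; split <;> simp
  rw [this, PySem.List.foldl_append_eq_flatMap]
  simp

lemma map_filter_eq_flatMap_ite {α β : Type} (l : List α) (p : α → Bool) (f : α → β) :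
    (l.filter p).map f = l.flatMap (fun x => if p x then [f x] else []) := by
  induction l with
  | nil => simp
  | cons x xs ih => by_cases h : p x <;> simp [h, ih]

lemma stepA_eq_flatMap (ens : List Int) (enc : List (List Int)) :
    stepA ens enc
      = enc.flatMap (fun i => ens.flatMap (fun j => if condA ens i j then [i ++ [j]] else [])) := by
  unfold stepA
  have hin : (fun (t : List (List Int)) (i : List Int) =>
      ens.foldl (fun t j => if condA ens i j then t ++ [i ++ [j]] else t) t)
        = fun t i => t ++ ens.flatMap (fun j => if condA ens i j then [i ++ [j]] else []) := by
    funext t i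
    rw [PySem.List.foldl_append_if (f := fun j => i ++ [j]), map_filter_eq_flatMap_ite]
  rw [hin, PySem.List.foldl_append_eq_flatMap]
  simp

lemma extendB_succ (ens : List Int) (first : PySem.Dict Int Int) (path : List Int) (n : Nat) :
    extendB ens first path (n + 1)
      = ens.flatMap (fun j => if condB ens first path j then extendB ens first (path ++ [j]) n else []) := by
  show ens.foldl (fun out j => if condB ens first path j then out ++ extendB ens first (path ++ [j]) n else out) [] = _
  exact foldl_append_if_eq_flatMap_ite ens _ _

-- MAIN: A's breadth-first levels = flatMap of B's depth-first extensions
lemma recDistA_eq_flatMap_extendB (ens : List Int) :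
    ∀ (n : Nat) (enc : List (List Int)),
      recDistA ens enc n = enc.flatMap (fun i => extendB ens (buildFirst ens) i n) := by
  intro n
  induction n with
  | zero => intro enc; simp [recDistA, extendB]
  | succ n ih =>
    intro enc
    show recDistA ens (stepA ens enc) n = _
    rw [ih, stepA_eq_flatMap, List.flatMap_assoc]
    apply List.flatMap_congr
    intro i _
    rw [extendB_succ, List.flatMap_assoc]
    apply List.flatMap_congr
    intro j _
    rw [condB_eq_condA]
    split <;> simp

-- ===== VERDICT (by name: the statement is the Claim_ definition above) =====
theorem rec_dist_spec : Claim_equal_rec_dist := by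
  intro ens enc deg _ _
  unfold Spec_rec_dist rec_dist rec_dist_alt
  rw [recDistA_eq_flatMap_extendB, PySem.List.foldl_append_eq_flatMap]
  simp
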